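-- pv_equiv track=rewrite | github.com/luornor/A2SV | codeforces_r964_Div4/B_Card_Game.py | solve
-- ===== SOURCE A (Python) =====
-- def solve(a1, a2, b1, b2):
--     configurations = [
--         (a1, b1, a2, b2),
--         (a1, b2, a2, b1),
--         (a2, b1, a1, b2),
--         (a2, b2, a1, b1)
--     ]
--
--     suneet_wins = 0
--
--     for a1, b1, a2, b2 in configurations:
--         suneet_rounds = 0
--         slavic_rounds = 0
--
--         if a1 > b1:
--             suneet_rounds += 1
--         elif a1 < b1:
--             slavic_rounds += 1
--
--         if a2 > b2:
--             suneet_rounds += 1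
--         elif a2 < b2:
--             slavic_rounds += 1
--
--         if suneet_rounds > slavic_rounds:
--             suneet_wins += 1
--
--     return suneet_wins
-- ===== SOURCE B (Python) =====
-- def solve(a1, a2, b1, b2):
--     # The winner depends only on which cards face each other, not round order,
--     # so the four configurations collapse into two matchings, each counted twice.
--     def wins(x1, y1, x2, y2):
--         suneet = (1 if x1 > y1 else 0) + (1 if x2 > y2 else 0)
--         slavic = (1 if x1 < y1 else 0) + (1 if x2 < y2 else 0)
--         return 1 if suneet > slavic else 0
--     return 2 * wins(a1, b1, a2, b2) + 2 * wins(a1, b2, a2, b1)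
-- ===== Notes on version B (the rewrite author's own statement) =====
-- stated objective: simpler
-- what changed: Collapses the four round-order configurations into the two distinct card matchings (a1-b1/a2-b2 and a1-b2/a2-b1) and multiplies each result by 2, using a single wins() helper instead of a loop over four tuples.
import Mathlib
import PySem

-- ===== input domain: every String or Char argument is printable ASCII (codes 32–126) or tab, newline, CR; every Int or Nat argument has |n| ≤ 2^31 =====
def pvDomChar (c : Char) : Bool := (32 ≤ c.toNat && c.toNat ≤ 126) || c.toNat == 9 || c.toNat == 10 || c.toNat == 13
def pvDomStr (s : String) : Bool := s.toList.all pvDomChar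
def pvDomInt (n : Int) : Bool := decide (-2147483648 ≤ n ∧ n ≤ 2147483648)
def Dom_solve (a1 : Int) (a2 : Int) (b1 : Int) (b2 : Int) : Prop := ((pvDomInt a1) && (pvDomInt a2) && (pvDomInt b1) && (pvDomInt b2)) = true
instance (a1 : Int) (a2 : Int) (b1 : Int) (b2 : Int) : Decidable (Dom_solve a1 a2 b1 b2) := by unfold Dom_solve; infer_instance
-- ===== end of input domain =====

-- B collapses A's four round-order configurations into the two distinct card matchings ×2 (objective: simpler).


-- ===== PORT A =====
-- per-configuration body of A's loop (elif a1 < b1 already excludes a1 > b1, so a plain if is faithful)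
def solveStep (acc : Int) (c : Int × Int × Int × Int) : Int :=
  match c with
  | (a1, b1, a2, b2) =>
    let suneet_rounds : Int := 0
    let slavic_rounds : Int := 0
    let suneet_rounds := if a1 > b1 then suneet_rounds + 1 else suneet_rounds
    let slavic_rounds := if a1 < b1 then slavic_rounds + 1 else slavic_rounds
    let suneet_rounds := if a2 > b2 then suneet_rounds + 1 else suneet_rounds
    let slavic_rounds := if a2 < b2 then slavic_rounds + 1 else slavic_rounds
    if suneet_rounds > slavic_rounds then acc + 1 else acc

def solve (a1 : Int) (a2 : Int) (b1 : Int) (b2 : Int) : Int :=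
  let configurations : List (Int × Int × Int × Int) :=
    [(a1, b1, a2, b2), (a1, b2, a2, b1), (a2, b1, a1, b2), (a2, b2, a1, b1)]
  configurations.foldl solveStep 0

-- ===== PORT B =====
-- B: 1 if Suneet wins strictly more rounds in the matching x1-y1 / x2-y2, else 0
def wins (x1 y1 x2 y2 : Int) : Int :=
  let suneet : Int := (if x1 > y1 then 1 else 0) + (if x2 > y2 then 1 else 0)
  let slavic : Int := (if x1 < y1 then 1 else 0) + (if x2 < y2 then 1 else 0)
  if suneet > slavic then 1 else 0

def solve_alt (a1 : Int) (a2 : Int) (b1 : Int) (b2 : Int) : Int :=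
  2 * wins a1 b1 a2 b2 + 2 * wins a1 b2 a2 b1

-- ===== PRECONDITION & SPEC =====
def Spec_solve (a1 : Int) (a2 : Int) (b1 : Int) (b2 : Int) (out : Int) : Prop := out = solve_alt a1 a2 b1 b2
instance (a1 : Int) (a2 : Int) (b1 : Int) (b2 : Int) (out : Int) : Decidable (Spec_solve a1 a2 b1 b2 out) := by unfold Spec_solve; infer_instance

-- ===== CLAIM (what is proved, stated in full; the proofs are below) =====
def Claim_equal_solve : Prop := ∀ (a1 : Int) (a2 : Int) (b1 : Int) (b2 : Int), Dom_solve a1 a2 b1 b2 → Spec_solve a1 a2 b1 b2 (solve a1 a2 b1 b2)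

-- ===== LEMMAS AND PROOFS =====

-- ===== VERDICT (by name: the statement is the Claim_ definition above) =====
-- each loop step adds exactly wins of that configuration
theorem solveStep_eq_wins (acc x1 y1 x2 y2 : Int) :
    solveStep acc (x1, y1, x2, y2) = acc + wins x1 y1 x2 y2 := by
  simp only [solveStep, wins]
  split_ifs <;> simp_all <;> omega

-- swapping the two rounds does not change the winner
theorem wins_swap (x1 y1 x2 y2 : Int) : wins x2 y2 x1 y1 = wins x1 y1 x2 y2 := by
  simp only [wins]
  split_ifs <;> simp_all

theorem solve_spec : Claim_equal_solve := by
  intro a1 a2 b1 b2 _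
  unfold Spec_solve solve solve_alt
  simp only [List.foldl, solveStep_eq_wins, wins_swap]
  ring
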